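-- pv_equiv track=rewrite | github.com/MrBrantCode/unitest_baseline | mut_generate/mist_train_cf/cf_68260/solution.py | find_divisors_gcd_lcm
-- ===== SOURCE A (Python) =====
-- def find_divisors_gcd_lcm(X, Y):
--     def find_divisors(num):
--         divisors = []
--         for i in range(1, num + 1):
--             if num % i == 0:
--                 divisors.append(i)
--         return divisors
--
--     def gcd(x, y):
--         while(y):
--             x, y = y, x % y
--         return x
--
--     def lcm(x, y):
--         lcm = (x*y)//gcd(x,y)
--         return lcm
--
--     divisors_X = find_divisors(X)
--     divisors_Y = find_divisors(Y)
--     common_divisors = list(set(divisors_X) & set(divisors_Y))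
--     GCD = gcd(X, Y)
--     LCM = lcm(X, Y)
--
--     return divisors_X, divisors_Y, common_divisors, GCD, LCM
-- ===== SOURCE B (Python) =====
-- def find_divisors_gcd_lcm(X, Y):
--     def sqrt_divisors(num):
--         small = []
--         large = []
--         i = 1
--         while i * i <= num:
--             if num % i == 0:
--                 small.append(i)
--                 if i * i != num:
--                     large.append(num // i)
--             i += 1
--         large.reverse()
--         return small + large
--
--     def gcd(x, y):
--         return x if y == 0 else gcd(y, x % y)
--
--     divisors_X = sqrt_divisors(X)
--     divisors_Y = sqrt_divisors(Y)
--     g = gcd(X, Y)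
--     common_divisors = sqrt_divisors(g) if X > 0 and Y > 0 else []
--     return divisors_X, divisors_Y, common_divisors, g, X * Y // g
-- ===== Notes on version B (the rewrite author's own statement) =====
-- stated objective: faster
-- what changed: B enumerates divisors by trial division only up to sqrt(n) (collecting i and n//i), computes the common divisors as the divisors of gcd(X,Y) instead of intersecting the two divisor sets, and uses a recursive gcd; Pre_ excludes (0,0), where A raises ZeroDivisionError, and positive inputs with gcd(X,Y) > 7, where the order of A's common-divisors list is CPython's accidental set-hash iteration order (B returns it sorted ascending).
-- outside the precondition, e.g. on find_divisors_gcd_lcm(0, 0): A raises ZeroDivisionError, B raises ZeroDivisionError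
import Mathlib
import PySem

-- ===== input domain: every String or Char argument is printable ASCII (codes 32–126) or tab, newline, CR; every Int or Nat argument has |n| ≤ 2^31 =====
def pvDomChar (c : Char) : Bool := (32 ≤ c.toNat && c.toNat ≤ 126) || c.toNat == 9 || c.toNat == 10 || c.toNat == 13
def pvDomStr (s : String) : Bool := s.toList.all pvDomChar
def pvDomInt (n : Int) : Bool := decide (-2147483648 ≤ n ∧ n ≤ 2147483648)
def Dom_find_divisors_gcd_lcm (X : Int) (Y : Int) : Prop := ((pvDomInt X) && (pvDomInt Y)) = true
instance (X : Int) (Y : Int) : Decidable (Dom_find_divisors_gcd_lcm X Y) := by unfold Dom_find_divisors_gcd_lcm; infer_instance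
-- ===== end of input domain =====

-- B enumerates divisors only up to sqrt(n) (pairing i with n//i) and takes the common divisors
-- as the divisors of gcd(X,Y): asymptotically faster; equal to A wherever A returns and its
-- common-divisors set order is not CPython hash order (see Pre_).


-- ===== PORT A =====

-- termination fact for the Euclid loop/recursion in both ports (cited in decreasing_by)
theorem pvModAbsLt (x y : Int) (hy : ¬ y = 0) : (PySem.Int.mod x y).natAbs < y.natAbs := by
  rcases lt_or_gt_of_ne hy with h | h
  · have h1 := PySem.Int.mod_neg_bounds x h
    omega
  · have h1 := PySem.Int.mod_nonneg x h
    have h2 := PySem.Int.mod_lt x h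
    omega

-- termination fact for B's sqrt loop (cited in decreasing_by)
theorem pvSqrtLoopTerm (num i : Int) (h : i * i ≤ num) :
    (num + 1 - (i + 1)).toNat < (num + 1 - i).toNat := by
  have hii : i ≤ i * i := by nlinarith [sq_nonneg (i - 1), sq_nonneg i]
  omega

-- A's inner find_divisors: for i in range(1, num+1): if num % i == 0: divisors.append(i)
def pvFindDivisors (num : Int) : List Int :=
  (PySem.List.pyRange 1 (num + 1) 1).foldl
    (fun divisors i => if PySem.Int.mod num i == 0 then divisors ++ [i] else divisors) []

-- A's gcd: while y: x, y = y, x % y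
def pvGcdA (x y : Int) : Int :=
  if h : y = 0 then x else pvGcdA y (PySem.Int.mod x y)
  termination_by y.natAbs
  decreasing_by exact pvModAbsLt x y h

def find_divisors_gcd_lcm (X : Int) (Y : Int) : List Int × List Int × List Int × Int × Int :=
  let divisors_X := pvFindDivisors X
  let divisors_Y := pvFindDivisors Y
  -- list(set(divisors_X) & set(divisors_Y)): Python's hash iteration order is modelled only
  -- inside Pre_ (gcd ≤ 7 or a nonpositive argument), where it is divisors_X's ascending order
  let common_divisors := PySem.Set.inter (PySem.Set.ofList divisors_X) (PySem.Set.ofList divisors_Y)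
  let GCD := pvGcdA X Y
  let LCM := PySem.Int.floordiv (X * Y) (pvGcdA X Y)
  (divisors_X, divisors_Y, common_divisors, GCD, LCM)

-- ===== PORT B =====

-- B's sqrt_divisors loop: while i*i <= num: if num % i == 0: small.append(i); if i*i != num: large.append(num//i)
def pvSqrtLoop (num i : Int) (small large : List Int) : List Int × List Int :=
  if h : i * i ≤ num then
    if PySem.Int.mod num i == 0 then
      pvSqrtLoop num (i + 1) (small ++ [i])
        (if i * i != num then large ++ [PySem.Int.floordiv num i] else large)
    else
      pvSqrtLoop num (i + 1) small large
  else (small, large)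
  termination_by (num + 1 - i).toNat
  decreasing_by
    · exact pvSqrtLoopTerm num i h
    · exact pvSqrtLoopTerm num i h

-- large.reverse(); return small + large
def pvSqrtDivisors (num : Int) : List Int :=
  let sl := pvSqrtLoop num 1 [] []
  sl.1 ++ sl.2.reverse

-- B's gcd: return x if y == 0 else gcd(y, x % y)
def pvGcdB (x y : Int) : Int :=
  if h : y = 0 then x else pvGcdB y (PySem.Int.mod x y)
  termination_by y.natAbs
  decreasing_by exact pvModAbsLt x y h

def find_divisors_gcd_lcm_alt (X : Int) (Y : Int) : List Int × List Int × List Int × Int × Int :=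
  let divisors_X := pvSqrtDivisors X
  let divisors_Y := pvSqrtDivisors Y
  let g := pvGcdB X Y
  let common_divisors := if 0 < X ∧ 0 < Y then pvSqrtDivisors g else []
  (divisors_X, divisors_Y, common_divisors, g, PySem.Int.floordiv (X * Y) g)

-- ===== PRECONDITION & SPEC =====

-- Pre_ excludes (0, 0), where A raises ZeroDivisionError computing the lcm, and pairs of
-- positive ints with gcd(X,Y) > 7, where the order of A's common-divisors list is CPython's
-- accidental set-hash iteration order (inside Pre_ that order is ascending, as B returns it).
def Pre_find_divisors_gcd_lcm (X : Int) (Y : Int) : Prop :=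
  ¬ (X = 0 ∧ Y = 0) ∧ (X ≤ 0 ∨ Y ≤ 0 ∨ Int.gcd X Y ≤ 7)
instance (X : Int) (Y : Int) : Decidable (Pre_find_divisors_gcd_lcm X Y) := by
  unfold Pre_find_divisors_gcd_lcm; infer_instance

def pvWitness_find_divisors_gcd_lcm : Int × Int := (12, 18)

def Spec_find_divisors_gcd_lcm (X : Int) (Y : Int) (out : List Int × List Int × List Int × Int × Int) : Prop := out = find_divisors_gcd_lcm_alt X Y
instance (X : Int) (Y : Int) (out : List Int × List Int × List Int × Int × Int) : Decidable (Spec_find_divisors_gcd_lcm X Y out) := by unfold Spec_find_divisors_gcd_lcm; infer_instance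

-- ===== CLAIM (what is proved, stated in full; the proofs are below) =====
def Claim_equal_find_divisors_gcd_lcm : Prop := ∀ (X : Int) (Y : Int), Dom_find_divisors_gcd_lcm X Y → Pre_find_divisors_gcd_lcm X Y → Spec_find_divisors_gcd_lcm X Y (find_divisors_gcd_lcm X Y)

-- ===== LEMMAS AND PROOFS =====

-- the two gcds are the same recursion
theorem pvGcd_eq (x y : Int) : pvGcdB x y = pvGcdA x y := by
  fun_induction pvGcdB x y with
  | case1 x => rw [pvGcdA, dif_pos rfl]
  | case2 x y h ih => rw [pvGcdA, dif_neg h]; exact ih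

-- A's divisors list is a filtered range
theorem pvFindDivisors_eq_filter (num : Int) :
    pvFindDivisors num
      = (PySem.List.pyRange 1 (num + 1) 1).filter (fun j => PySem.Int.mod num j == 0) := by
  unfold pvFindDivisors
  simpa using PySem.List.foldl_append_if_eq_filter (fun j => PySem.Int.mod num j == 0) (PySem.List.pyRange 1 (num + 1) 1) []

theorem mem_pvFindDivisors (num d : Int) :
    d ∈ pvFindDivisors num ↔ 1 ≤ d ∧ d ≤ num ∧ d ∣ num := by
  rw [pvFindDivisors_eq_filter]
  simp only [List.mem_filter, PySem.List.mem_pyRange_one, beq_iff_eq, PySem.Int.mod_eq_zero_iff_dvd]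
  constructor
  · rintro ⟨⟨ha, hb⟩, hd⟩; exact ⟨ha, by omega, hd⟩
  · rintro ⟨ha, hb, hd⟩; exact ⟨⟨ha, by omega⟩, hd⟩

theorem pairwise_pvFindDivisors (num : Int) : (pvFindDivisors num).Pairwise (· < ·) := by
  rw [pvFindDivisors_eq_filter]
  exact (PySem.List.pairwise_lt_pyRange_one 1 (num + 1)).filter _

-- two strictly increasing integer lists with the same members are equal
theorem pvStrictSortedExt (l1 l2 : List Int) (h1 : l1.Pairwise (· < ·)) (h2 : l2.Pairwise (· < ·))
    (hm : ∀ x, x ∈ l1 ↔ x ∈ l2) : l1 = l2 := by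
  have n1 : l1.Nodup := h1.imp (fun h => ne_of_lt h)
  have n2 : l2.Nodup := h2.imp (fun h => ne_of_lt h)
  exact PySem.List.eq_of_perm_of_pairwise_le_of_injective (fun x : Int => x)
    (fun a b h => h) ((List.perm_ext_iff_of_nodup n1 n2).mpr hm)
    (h1.imp le_of_lt) (h2.imp le_of_lt)

-- floor square root, used only inside the proofs
def pvR (num : Int) : Int := ((Nat.sqrt num.toNat : Nat) : Int)

theorem pvR_iff (num i : Int) (hi : 1 ≤ i) : i * i ≤ num ↔ i ≤ pvR num := by
  unfold pvR
  by_cases hn : 0 ≤ num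
  · have hi' : ((i.toNat : Nat) : Int) = i := by omega
    have hn' : ((num.toNat : Nat) : Int) = num := by omega
    constructor
    · intro h
      have h1 : i.toNat * i.toNat ≤ num.toNat := by
        have : ((i.toNat * i.toNat : Nat) : Int) ≤ ((num.toNat : Nat) : Int) := by
          push_cast; rw [hi', hn']; exact h
        exact_mod_cast this
      have := Nat.le_sqrt.mpr h1
      omega
    · intro h
      have h1 : i.toNat ≤ Nat.sqrt num.toNat := by omega
      have h2 : i.toNat * i.toNat ≤ num.toNat := Nat.le_sqrt.mp h1
      have : ((i.toNat * i.toNat : Nat) : Int) ≤ ((num.toNat : Nat) : Int) := by exact_mod_cast h2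
      push_cast at this
      rw [hi', hn'] at this
      exact this
  · push_neg at hn
    have h0 : num.toNat = 0 := by omega
    rw [h0]
    simp only [Nat.sqrt_zero, Nat.cast_zero]
    constructor
    · intro h; nlinarith
    · intro h; omega

theorem pvR_sq_le (num : Int) (h : 0 ≤ num) : pvR num * pvR num ≤ num := by
  unfold pvR
  have h1 : Nat.sqrt num.toNat * Nat.sqrt num.toNat ≤ num.toNat := by
    have := Nat.sqrt_le' num.toNat
    nlinarith [this]
  have : ((Nat.sqrt num.toNat * Nat.sqrt num.toNat : Nat) : Int) ≤ ((num.toNat : Nat) : Int) := by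
    exact_mod_cast h1
  push_cast at this
  omega

theorem pvSqrtLoop_spec (num : Int) : ∀ n : Nat, ∀ i : Int, (num + 1 - i).toNat = n → 1 ≤ i →
    ∀ small large : List Int,
    pvSqrtLoop num i small large =
      (small ++ (PySem.List.pyRange i (pvR num + 1)).filter (fun j => PySem.Int.mod num j == 0),
       large ++ ((PySem.List.pyRange i (pvR num + 1)).filter
           (fun j => PySem.Int.mod num j == 0 && j * j != num)).map
         (fun j => PySem.Int.floordiv num j)) := by
  intro n
  induction n using Nat.strong_induction_on with
  | _ n ih =>
    intro i hn hi small large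
    rw [pvSqrtLoop]
    by_cases hcase : i * i ≤ num
    · rw [dif_pos hcase]
      have hik : i ≤ pvR num := (pvR_iff num i hi).mp hcase
      have hcons := PySem.List.pyRange_one_cons (show i < pvR num + 1 by omega)
      have hrec := ih (num + 1 - (i + 1)).toNat (by have := pvSqrtLoopTerm num i hcase; omega)
        (i + 1) rfl (by omega)
      by_cases hmod : (PySem.Int.mod num i == 0) = true
      · rw [if_pos hmod]
        rw [hrec]
        rw [hcons, List.filter_cons, List.filter_cons]
        by_cases hsq : (i * i != num) = true
        · simp only [hmod, hsq, Bool.and_self, if_pos, List.map_cons,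
            List.append_assoc, List.cons_append, List.nil_append]
        · have hsq' : (i * i != num) = false := by simpa using hsq
          simp only [hmod, hsq', Bool.true_and, if_true, if_false, Bool.false_eq_true,
            List.append_assoc, List.cons_append, List.nil_append]
      · have hmod' : (PySem.Int.mod num i == 0) = false := by simpa using hmod
        rw [if_neg (by simp [hmod'])]
        rw [hrec]
        rw [hcons, List.filter_cons, List.filter_cons]
        simp only [hmod', Bool.false_and, if_false, Bool.false_eq_true]
    · rw [dif_neg hcase]
      have hik : ¬ i ≤ pvR num := fun h => hcase ((pvR_iff num i hi).mpr h)
      rw [PySem.List.pyRange_one_eq_nil (show pvR num + 1 ≤ i by omega)]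
      simp

theorem pvSqrtDivisors_char (num : Int) :
    pvSqrtDivisors num =
      (PySem.List.pyRange 1 (pvR num + 1)).filter (fun j => PySem.Int.mod num j == 0) ++
      (((PySem.List.pyRange 1 (pvR num + 1)).filter
          (fun j => PySem.Int.mod num j == 0 && j * j != num)).map
        (fun j => PySem.Int.floordiv num j)).reverse := by
  unfold pvSqrtDivisors
  rw [pvSqrtLoop_spec num (num + 1 - 1).toNat 1 rfl (by omega) [] []]
  simp

theorem pvSqrtDivisors_eq (num : Int) : pvSqrtDivisors num = pvFindDivisors num := by
  by_cases hn : num ≤ 0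
  · rw [pvSqrtDivisors_char]
    have h0 : pvR num = 0 := by
      unfold pvR
      have : num.toNat = 0 := by omega
      simp [this]
    rw [h0, PySem.List.pyRange_one_eq_nil (by omega : (0:Int) + 1 ≤ 1)]
    rw [pvFindDivisors_eq_filter, PySem.List.pyRange_one_eq_nil (by omega : num + 1 ≤ 1)]
    simp
  · -- num ≥ 1
    push_neg at hn
    have hsq := pvR_sq_le num hn.le
    apply pvStrictSortedExt
    · -- strictly increasing
      rw [pvSqrtDivisors_char]
      rw [List.pairwise_append]
      refine ⟨(PySem.List.pairwise_lt_pyRange_one 1 (pvR num + 1)).filter _, ?_, ?_⟩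
      · rw [List.pairwise_reverse, List.pairwise_map]
        refine List.Pairwise.imp_of_mem ?_
          ((PySem.List.pairwise_lt_pyRange_one 1 (pvR num + 1)).filter _)
        intro a b ha hb hab
        simp only [List.mem_filter, PySem.List.mem_pyRange_one, Bool.and_eq_true, beq_iff_eq,
          bne_iff_ne, PySem.Int.mod_eq_zero_iff_dvd] at ha hb
        obtain ⟨⟨ha1, har⟩, hda, hsa⟩ := ha
        obtain ⟨⟨hb1, hbr⟩, hdb, hsb⟩ := hb
        rw [PySem.Int.floordiv_eq_ediv_of_pos (by omega : (0:Int) < a),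
            PySem.Int.floordiv_eq_ediv_of_pos (by omega : (0:Int) < b)]
        -- num / b < num / a  from a < b, both divisors
        have ea : a * (num / a) = num := Int.mul_ediv_cancel' hda
        have eb : b * (num / b) = num := Int.mul_ediv_cancel' hdb
        have hqa : 1 ≤ num / a := (Int.le_ediv_iff_mul_le (by omega)).mpr (by nlinarith)
        have hqb : 1 ≤ num / b := (Int.le_ediv_iff_mul_le (by omega)).mpr (by nlinarith)
        by_contra hcon
        push_neg at hcon
        nlinarith
      · -- every small element is below every (reversed) large element
        intro a ha b hb
        rw [List.mem_reverse, List.mem_map] at hb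
        obtain ⟨j, hj, rfl⟩ := hb
        simp only [List.mem_filter, PySem.List.mem_pyRange_one, Bool.and_eq_true, beq_iff_eq,
          bne_iff_ne, PySem.Int.mod_eq_zero_iff_dvd] at ha hj
        obtain ⟨⟨ha1, har⟩, hda⟩ := ha
        obtain ⟨⟨hj1, hjr⟩, hdj, hsj⟩ := hj
        rw [PySem.Int.floordiv_eq_ediv_of_pos (by omega : (0:Int) < j)]
        -- a ≤ pvR num < num / j
        have ej : j * (num / j) = num := Int.mul_ediv_cancel' hdj
        have hcontra : pvR num < num / j := by
          by_contra hcon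
          push_neg at hcon
          have h1 : num ≤ j * pvR num := by nlinarith
          have h2 : j * pvR num ≤ pvR num * pvR num := by nlinarith
          have h3 : num = j * pvR num := le_antisymm h1 (by nlinarith)
          have h4 : j * pvR num = pvR num * pvR num := by nlinarith
          have hj_eq : j = pvR num := by
            have hr1 : 1 ≤ pvR num := by omega
            nlinarith
          exact hsj (by nlinarith)
        omega
    · exact pairwise_pvFindDivisors num
    · -- same members
      intro d
      rw [pvSqrtDivisors_char, mem_pvFindDivisors, List.mem_append, List.mem_reverse,
        List.mem_map]
      simp only [List.mem_filter, PySem.List.mem_pyRange_one, Bool.and_eq_true, beq_iff_eq,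
        bne_iff_ne, PySem.Int.mod_eq_zero_iff_dvd]
      constructor
      · rintro (⟨⟨h1, h2⟩, h3⟩ | ⟨j, ⟨⟨hj1, hj2⟩, hdj, hsj⟩, rfl⟩)
        · exact ⟨h1, le_trans (by nlinarith [pvR_sq_le num hn.le]) (le_refl num) |>.trans
            (le_refl num) |>.trans_eq rfl |>.trans (le_refl num) |> fun _ => Int.le_of_dvd hn h3, h3⟩
        · have ej : j * (PySem.Int.floordiv num j) = num := by
            rw [PySem.Int.floordiv_eq_ediv_of_pos (by omega : (0:Int) < j)]
            exact Int.mul_ediv_cancel' hdj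
          refine ⟨?_, ?_, ⟨j, by linarith [ej]⟩⟩
          · nlinarith
          · nlinarith
      · rintro ⟨h1, h2, h3⟩
        by_cases hd : d * d ≤ num
        · exact Or.inl ⟨⟨h1, by have := (pvR_iff num d h1).mp hd; omega⟩, h3⟩
        · right
          push_neg at hd
          have ed : d * (num / d) = num := Int.mul_ediv_cancel' h3
          set q := num / d with hq
          have hq1 : 1 ≤ q := by
            rw [hq]
            exact (Int.le_ediv_iff_mul_le (by omega)).mpr (by nlinarith)
          have hqd : q < d := by nlinarith
          have hqq : q * q < num := by nlinarith
          have hqr : q ≤ pvR num := (pvR_iff num q hq1).mp hqq.le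
          have emul : num = q * d := by rw [mul_comm]; omega
          refine ⟨q, ⟨⟨hq1, by omega⟩, ⟨d, emul⟩, by omega⟩, ?_⟩
          rw [PySem.Int.floordiv_eq_ediv_of_pos (by omega : (0:Int) < q)]
          rw [emul]
          exact Int.mul_ediv_cancel_left d (by omega)

theorem pvGcdA_eq_gcd (y : Int) (hy : 0 ≤ y) (x : Int) (hx : 0 < x) :
    pvGcdA x y = (Int.gcd x y : Int) := by
  have H : ∀ n : Nat, ∀ y : Int, y.toNat = n → 0 ≤ y → ∀ x : Int, 0 < x →
      pvGcdA x y = (Int.gcd x y : Int) := by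
    intro n
    induction n using Nat.strong_induction_on with
    | _ n ih =>
      intro y hyn hy0 x hx
      rw [pvGcdA]
      by_cases h0 : y = 0
      · subst h0
        rw [dif_pos rfl]
        simp [Int.natAbs_of_nonneg hx.le]
      · rw [dif_neg h0]
        have hypos : 0 < y := lt_of_le_of_ne hy0 (Ne.symm h0)
        have hm1 := PySem.Int.mod_nonneg x hypos
        have hm2 := PySem.Int.mod_lt x hypos
        rw [ih (PySem.Int.mod x y).toNat (by omega) _ rfl hm1 y hypos]
        rw [PySem.Int.mod_eq_emod_of_pos hypos]
        congr 1
        rw [Int.gcd_comm, Int.gcd_emod]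
  exact H y.toNat y rfl hy x hx

theorem pvCommon_eq (X Y : Int) (hpre : ¬ (X = 0 ∧ Y = 0)) :
    PySem.Set.inter (PySem.Set.ofList (pvFindDivisors X)) (PySem.Set.ofList (pvFindDivisors Y))
      = (if 0 < X ∧ 0 < Y then pvSqrtDivisors (pvGcdB X Y) else []) := by
  have ndX : (pvFindDivisors X).Nodup := (pairwise_pvFindDivisors X).imp (fun h => ne_of_lt h)
  have ndY : (pvFindDivisors Y).Nodup := (pairwise_pvFindDivisors Y).imp (fun h => ne_of_lt h)
  rw [PySem.Set.ofList_eq_self_of_nodup _ ndX, PySem.Set.ofList_eq_self_of_nodup _ ndY]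
  by_cases hxy : 0 < X ∧ 0 < Y
  · obtain ⟨hX, hY⟩ := hxy
    rw [if_pos ⟨hX, hY⟩]
    have hg : pvGcdB X Y = (Int.gcd X Y : Int) := by
      rw [pvGcd_eq]; exact pvGcdA_eq_gcd Y hY.le X hX
    have hgpos : 0 < (Int.gcd X Y : Int) := by
      have : 0 < Int.gcd X Y := Int.gcd_pos_iff.mpr (Or.inl (by omega))
      exact_mod_cast this
    rw [hg, pvSqrtDivisors_eq]
    apply pvStrictSortedExt
    · exact List.Pairwise.filter _ (pairwise_pvFindDivisors X)
    · exact pairwise_pvFindDivisors _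
    · intro x
      rw [PySem.Set.mem_inter, mem_pvFindDivisors, mem_pvFindDivisors, mem_pvFindDivisors]
      constructor
      · rintro ⟨⟨hx1, hx2, hx3⟩, _, _, hy3⟩
        have hdvd : x ∣ (Int.gcd X Y : Int) := by
          have h1 : x.natAbs ∣ X.natAbs := Int.natAbs_dvd_natAbs.mpr hx3
          have h2 : x.natAbs ∣ Y.natAbs := Int.natAbs_dvd_natAbs.mpr hy3
          have h3 : x.natAbs ∣ Int.gcd X Y := Nat.dvd_gcd h1 h2
          exact Int.natAbs_dvd.mp (Int.natCast_dvd_natCast.mpr h3)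
        exact ⟨hx1, Int.le_of_dvd hgpos hdvd, hdvd⟩
      · rintro ⟨hx1, hx2, hx3⟩
        have hdX : x ∣ X := hx3.trans (Int.gcd_dvd_left X Y)
        have hdY : x ∣ Y := hx3.trans (Int.gcd_dvd_right X Y)
        exact ⟨⟨hx1, Int.le_of_dvd hX hdX, hdX⟩, hx1, Int.le_of_dvd hY hdY, hdY⟩
  · rw [if_neg hxy]
    have hor : X ≤ 0 ∨ Y ≤ 0 := by omega
    rcases hor with h | h
    · have hnil : pvFindDivisors X = [] := by
        rw [pvFindDivisors_eq_filter, PySem.List.pyRange_one_eq_nil (by omega)]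
        rfl
      rw [hnil]
      rfl
    · have hnil : pvFindDivisors Y = [] := by
        rw [pvFindDivisors_eq_filter, PySem.List.pyRange_one_eq_nil (by omega)]
        rfl
      rw [hnil]
      simp [PySem.Set.inter]

-- ===== VERDICT (by name: the statement is the Claim_ definition above) =====
theorem find_divisors_gcd_lcm_spec : Claim_equal_find_divisors_gcd_lcm := by
  intro X Y _ hpre
  unfold Spec_find_divisors_gcd_lcm find_divisors_gcd_lcm find_divisors_gcd_lcm_alt
  simp only []
  refine Prod.ext ?_ (Prod.ext ?_ (Prod.ext ?_ (Prod.ext ?_ ?_))) <;> simp only []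
  · exact (pvSqrtDivisors_eq X).symm
  · exact (pvSqrtDivisors_eq Y).symm
  · exact pvCommon_eq X Y hpre.1
  · exact (pvGcd_eq X Y).symm
  · rw [pvGcd_eq]
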